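-- pv_equiv track=rewrite | github.com/abdulmajid100/multi-agv-coordination | RL_based_traffic2.py | state_to_index
-- ===== SOURCE A (Python) =====
-- def state_to_index(state, num_nodes):
--     """
--     Convert a multi-agent state to a unique index for Q-table.
--     """
--     num_agents = len(state)
--     index = 0
--     factor = 1
--
--     for i in range(num_agents - 1, -1, -1):
--         node_id = state[i] - 1  # Adjust for 1-based node IDs
--         index += node_id * factor
--         factor *= num_nodes
--
--     return int(index)
-- ===== SOURCE B (Python) =====
-- def state_to_index(state, num_nodes):
--     """
--     Convert a multi-agent state to a unique index for Q-table.
--     """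
--     index = 0
--     for node in state:
--         index = index * num_nodes + (node - 1)
--     return int(index)
-- ===== Notes on version B (the rewrite author's own statement) =====
-- stated objective: simpler
-- what changed: Replaces the reverse index loop maintaining a separate place-value `factor` with a forward Horner accumulation over the elements themselves, keeping only the single accumulator.
import Mathlib
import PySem

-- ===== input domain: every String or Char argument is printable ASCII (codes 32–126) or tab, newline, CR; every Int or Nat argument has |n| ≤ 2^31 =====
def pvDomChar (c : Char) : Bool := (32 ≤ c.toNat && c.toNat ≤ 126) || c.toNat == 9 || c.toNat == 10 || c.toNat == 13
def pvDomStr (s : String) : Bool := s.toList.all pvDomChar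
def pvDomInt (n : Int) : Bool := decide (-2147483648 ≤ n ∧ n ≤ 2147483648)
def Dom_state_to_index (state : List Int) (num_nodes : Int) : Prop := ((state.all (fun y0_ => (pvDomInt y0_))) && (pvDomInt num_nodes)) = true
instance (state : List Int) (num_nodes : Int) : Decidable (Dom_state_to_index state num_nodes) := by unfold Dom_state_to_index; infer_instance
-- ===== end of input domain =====

-- B replaces the backward index loop with an explicit place-value `factor` by a
-- forward Horner accumulation over the elements themselves (objective: simpler).


-- ===== PORT A =====
-- Literal port of A: loop over range(num_agents-1, -1, -1), state (index, factor).
-- state[i] is ported as pyGetD state i 0; every i the loop visits is in range, so this is exact.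
def state_to_index (state : List Int) (num_nodes : Int) : Int :=
  let num_agents : Int := state.length
  let r := (PySem.List.pyRange (num_agents - 1) (-1) (-1)).foldl
    (fun (p : Int × Int) i =>
      let node_id := PySem.List.pyGetD state i 0 - 1
      (p.1 + node_id * p.2, p.2 * num_nodes)) (0, 1)
  r.1

-- ===== PORT B =====
def state_to_index_alt (state : List Int) (num_nodes : Int) : Int :=
  state.foldl (fun index node => index * num_nodes + (node - 1)) 0

-- ===== PRECONDITION & SPEC =====
def Spec_state_to_index (state : List Int) (num_nodes : Int) (out : Int) : Prop := out = state_to_index_alt state num_nodes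
instance (state : List Int) (num_nodes : Int) (out : Int) : Decidable (Spec_state_to_index state num_nodes out) := by unfold Spec_state_to_index; infer_instance

-- ===== CLAIM (what is proved, stated in full; the proofs are below) =====
def Claim_equal_state_to_index : Prop := ∀ (state : List Int) (num_nodes : Int), Dom_state_to_index state num_nodes → Spec_state_to_index state num_nodes (state_to_index state num_nodes)

-- ===== LEMMAS AND PROOFS =====

-- Horner's rule with a nonzero start value.
theorem horner_shift (m : Int) (t : List Int) (a : Int) :
    t.foldl (fun acc x => acc * m + (x - 1)) a
      = a * m ^ t.length + t.foldl (fun acc x => acc * m + (x - 1)) 0 := by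
  induction t generalizing a with
  | nil => simp
  | cons x t ih =>
    simp only [List.foldl_cons, List.length_cons]
    rw [ih (a * m + (x - 1)), ih (0 * m + (x - 1))]
    ring

-- A's pair-state fold over the reversed list, characterised in one go.
theorem foldA_pair (m : Int) (l : List Int) (idx f : Int) :
    l.reverse.foldl (fun (p : Int × Int) x => (p.1 + (x - 1) * p.2, p.2 * m)) (idx, f)
      = (idx + f * l.foldl (fun acc x => acc * m + (x - 1)) 0, f * m ^ l.length) := by
  induction l generalizing idx f with
  | nil => simp
  | cons x t ih =>
    simp only [List.reverse_cons, List.foldl_append, ih,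
      List.foldl, List.length_cons]
    rw [horner_shift m t (0 * m + (x - 1))]
    simp only [Prod.mk.injEq]
    exact ⟨by ring, by ring⟩

-- ===== VERDICT (by name: the statement is the Claim_ definition above) =====
theorem state_to_index_spec : Claim_equal_state_to_index := by
  intro state num_nodes _
  show state_to_index state num_nodes = state_to_index_alt state num_nodes
  unfold state_to_index state_to_index_alt
  dsimp only
  have hrev : PySem.List.pyRange ((state.length : Int) - 1) (-1) (-1)
      = (PySem.List.pyRange 0 (state.length : Int) 1).reverse := by
    have := PySem.List.pyRange_neg_one_eq_reverse ((state.length : Int) - 1) (-1)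
    simpa using this
  rw [hrev]
  have hmap : (PySem.List.pyRange 0 (state.length : Int) 1).map
      (fun j => PySem.List.pyGetD state j 0) = state := by
    simpa using PySem.List.map_pyGetD_pyRange_zero' state 0
  calc ((PySem.List.pyRange 0 (state.length : Int) 1).reverse.foldl
        (fun (p : Int × Int) i =>
          (p.1 + (PySem.List.pyGetD state i 0 - 1) * p.2, p.2 * num_nodes)) (0, 1)).1
      = (((PySem.List.pyRange 0 (state.length : Int) 1).map
          (fun j => PySem.List.pyGetD state j 0)).reverse.foldl
          (fun (p : Int × Int) x => (p.1 + (x - 1) * p.2, p.2 * num_nodes)) (0, 1)).1 := by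
        rw [← List.map_reverse, List.foldl_map]
    _ = state.foldl (fun index node => index * num_nodes + (node - 1)) 0 := by
        rw [hmap, foldA_pair]; ring
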